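-- pv_equiv track=rewrite | github.com/xenserver/auto-cert-kit | autocertkit/utils.py | combine_recs
-- ===== SOURCE A (Python) =====
-- def combine_recs(rec1, rec2):
--     """Utility function for combining two records into one."""
--     rec = dict(rec1)
--     for k, v in rec2.items():
--         if k in rec.keys():
--             raise Exception(
--                 "Cannot combine these recs, and keys overalp (%s)" % k)
--         rec[k] = v
--
--     return rec
-- ===== SOURCE B (Python) =====
-- def combine_recs(rec1, rec2):
--     """Utility function for combining two records into one."""
--     dups = set(rec1) & set(rec2)
--     if dups:
--         raise Exception(
--             "Cannot combine these recs, and keys overalp (%s)" %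
--             next(k for k in rec2 if k in rec1))
--     return {**rec1, **rec2}
-- ===== Notes on version B (the rewrite author's own statement) =====
-- stated objective: idiomatic
-- what changed: Replaced the interleaved per-key check-and-insert loop by a set-intersection overlap test followed by a single bulk dict merge {**rec1, **rec2}.
import Mathlib
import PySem

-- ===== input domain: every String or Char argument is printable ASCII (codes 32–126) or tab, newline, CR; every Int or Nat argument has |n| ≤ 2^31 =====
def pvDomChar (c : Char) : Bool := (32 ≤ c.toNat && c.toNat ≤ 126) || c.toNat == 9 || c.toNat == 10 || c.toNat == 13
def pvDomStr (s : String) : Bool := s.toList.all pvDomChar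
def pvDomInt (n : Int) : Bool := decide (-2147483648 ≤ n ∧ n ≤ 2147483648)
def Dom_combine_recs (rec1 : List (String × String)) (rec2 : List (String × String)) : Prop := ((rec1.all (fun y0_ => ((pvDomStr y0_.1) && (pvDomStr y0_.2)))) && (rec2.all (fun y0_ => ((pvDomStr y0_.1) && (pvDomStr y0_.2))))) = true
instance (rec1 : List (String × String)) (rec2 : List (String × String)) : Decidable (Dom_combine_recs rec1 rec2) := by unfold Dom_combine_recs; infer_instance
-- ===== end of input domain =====

-- B replaces A's interleaved check-and-insert loop by a set-intersection overlap test plus one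
-- bulk dict merge (idiomatic); equivalence is about the RETURN value (A mutates only its local copy).

-- ===== PORT A =====
-- the loop 'for k, v in rec2.items(): if k in rec: raise; rec[k] = v'; none = the raise
def combine_recs_go (rec : PySem.Dict String String) :
    List (String × String) → Option (PySem.Dict String String)
  | [] => some rec
  | (k, v) :: t =>
    if (rec.get? k).isSome then none
    else combine_recs_go (rec.insert k v) t

def combine_recs (rec1 : List (String × String)) (rec2 : List (String × String)) : List (String × String) :=
  ((combine_recs_go (PySem.Dict.ofList rec1) rec2).getD PySem.Dict.empty).items

-- ===== PORT B =====
def combine_recs_alt (rec1 : List (String × String)) (rec2 : List (String × String)) : List (String × String) :=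
  let dups := PySem.Set.inter (PySem.Set.ofList (rec1.map Prod.fst)) (PySem.Set.ofList (rec2.map Prod.fst))
  if dups.isEmpty then ((PySem.Dict.ofList rec1).update rec2).items
  else []  -- the raise

-- ===== PRECONDITION & SPEC =====
-- Pre_ excludes exactly the inputs on which A raises: a rec2 key already present in rec1, or
-- (for raw association lists; a Python dict never has them) a duplicated key inside rec2.
def Pre_combine_recs (rec1 : List (String × String)) (rec2 : List (String × String)) : Prop :=
  (∀ p ∈ rec2, p.1 ∉ rec1.map Prod.fst) ∧ (rec2.map Prod.fst).Nodup
instance (rec1 : List (String × String)) (rec2 : List (String × String)) : Decidable (Pre_combine_recs rec1 rec2) := by unfold Pre_combine_recs; infer_instance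

def pvWitness_combine_recs : (List (String × String)) × (List (String × String)) :=
  ([("a", "1"), ("b", "2")], [("c", "3")])

def Spec_combine_recs (rec1 : List (String × String)) (rec2 : List (String × String)) (out : List (String × String)) : Prop := out = combine_recs_alt rec1 rec2
instance (rec1 : List (String × String)) (rec2 : List (String × String)) (out : List (String × String)) : Decidable (Spec_combine_recs rec1 rec2 out) := by unfold Spec_combine_recs; infer_instance

-- ===== CLAIM (what is proved, stated in full; the proofs are below) =====
def Claim_equal_combine_recs : Prop := ∀ (rec1 : List (String × String)) (rec2 : List (String × String)), Dom_combine_recs rec1 rec2 → Pre_combine_recs rec1 rec2 → Spec_combine_recs rec1 rec2 (combine_recs rec1 rec2)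

-- ===== LEMMAS AND PROOFS =====

-- A's loop never raises when every rec2 key is fresh, and then it is exactly a dict update.
theorem combine_recs_go_eq_update (rec2 : List (String × String)) :
    ∀ (d : PySem.Dict String String),
      (∀ p ∈ rec2, d.get? p.1 = none) → (rec2.map Prod.fst).Nodup →
      combine_recs_go d rec2 = some (d.update rec2) := by
  induction rec2 with
  | nil => intro d _ _; simp [combine_recs_go, PySem.Dict.update]
  | cons p t ih =>
    intro d hfresh hnd
    obtain ⟨k, v⟩ := p
    have hk : d.get? k = none := hfresh (k, v) (List.mem_cons_self ..)
    simp only [List.map_cons, List.nodup_cons] at hnd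
    have ht : ∀ q ∈ t, (d.insert k v).get? q.1 = none := by
      intro q hq
      have hne : q.1 ≠ k := fun h => hnd.1 (h ▸ List.mem_map_of_mem hq)
      rw [PySem.Dict.get?_insert_of_ne (hne := hne)]
      exact hfresh q (List.mem_cons_of_mem _ hq)
    rw [combine_recs_go, hk]
    simp only [Option.isSome_none, Bool.false_eq_true, if_false]
    rw [ih (d.insert k v) ht hnd.2]
    simp [PySem.Dict.update]

-- ===== VERDICT (by name: the statement is the Claim_ definition above) =====
theorem combine_recs_spec : Claim_equal_combine_recs := by
  intro rec1 rec2 _ hpre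
  obtain ⟨hdisj, hnd⟩ := hpre
  have hkeys : (PySem.Dict.ofList rec1).keys = PySem.Set.ofList (rec1.map Prod.fst) := by
    show (rec1.foldl (fun d p => d.insert p.1 p.2) PySem.Dict.empty).keys = _
    rw [PySem.Dict.keys_foldl_insert_key rec1 Prod.fst (fun _ p => p.2)]
    simp [PySem.Dict.keys_empty, PySem.Set.update_nil_left]
  have hfresh : ∀ p ∈ rec2, (PySem.Dict.ofList rec1).get? p.1 = none := by
    intro p hp
    rw [PySem.Dict.get?_eq_none_iff_not_mem_keys, hkeys, PySem.Set.mem_ofList]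
    exact hdisj p hp
  have hdups : (PySem.Set.inter (PySem.Set.ofList (rec1.map Prod.fst))
      (PySem.Set.ofList (rec2.map Prod.fst))).isEmpty = true := by
    rw [List.isEmpty_iff]
    show (PySem.Set.ofList (rec1.map Prod.fst)).filter
      (fun x => (PySem.Set.ofList (rec2.map Prod.fst)).contains x) = []
    rw [List.filter_eq_nil_iff]
    intro k hk hc
    have hk1 : k ∈ rec1.map Prod.fst := (PySem.Set.mem_ofList _ _).1 hk
    have hk2 : k ∈ rec2.map Prod.fst := by
      simp only [PySem.Set.contains, List.contains_iff_mem] at hc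
      exact (PySem.Set.mem_ofList _ _).1 hc
    obtain ⟨p, hp, rfl⟩ := List.mem_map.1 hk2
    exact hdisj p hp hk1
  unfold Spec_combine_recs combine_recs combine_recs_alt
  rw [combine_recs_go_eq_update rec2 _ hfresh hnd]
  simp only [Option.getD_some]
  rw [if_pos hdups]
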